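-- pv_equiv track=rewrite | github.com/ejacklab/vtic | src/vtic/storage.py | _parse_body
-- ===== SOURCE A (Python) =====
-- DESCRIPTION_DELIMITER = "<!-- DESCRIPTION -->"
--
-- FIX_DELIMITER = "<!-- FIX -->"
--
-- def _parse_body(body: str) -> tuple[str | None, str | None]:
--     stripped = body.strip()
--     if not stripped:
--         return None, None
--
--     lines = stripped.splitlines()
--     description: list[str] = []
--     fix: list[str] = []
--     current: list[str] | None = None
--     saw_marker = False
--
--     for line in lines:
--         if line == DESCRIPTION_DELIMITER:
--             current = description
--             saw_marker = True
--             continue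
--         if line == FIX_DELIMITER:
--             current = fix
--             saw_marker = True
--             continue
--         if current is None:
--             continue
--         current.append(line)
--
--     description_text = "\n".join(description).strip() or None
--     fix_text = "\n".join(fix).strip() or None
--     if description_text is None and fix_text is None:
--         if saw_marker:
--             return None, None
--         return stripped or None, None
--     return description_text, fix_text
-- ===== SOURCE B (Python) =====
-- DESCRIPTION_DELIMITER = "<!-- DESCRIPTION -->"
--
-- FIX_DELIMITER = "<!-- FIX -->"
--
--
-- def _parse_body(body: str) -> tuple[str | None, str | None]:
--     stripped = body.strip()
--     if not stripped:
--         return None, None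
--
--     lines = stripped.splitlines()
--     description: list[str] = []
--     fix: list[str] = []
--     saw_marker = False
--     n = len(lines)
--     i = 0
--     while i < n:
--         line = lines[i]
--         i += 1
--         if line == DESCRIPTION_DELIMITER or line == FIX_DELIMITER:
--             saw_marker = True
--             j = i
--             while j < n and lines[j] != DESCRIPTION_DELIMITER and lines[j] != FIX_DELIMITER:
--                 j += 1
--             segment = lines[i:j]
--             if line == DESCRIPTION_DELIMITER:
--                 description.extend(segment)
--             else:
--                 fix.extend(segment)
--             i = j
--
--     description_text = "\n".join(description).strip() or None
--     fix_text = "\n".join(fix).strip() or None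
--     if description_text is None and fix_text is None:
--         if saw_marker:
--             return None, None
--         return stripped or None, None
--     return description_text, fix_text
-- ===== Notes on version B (the rewrite author's own statement) =====
-- stated objective: alternative
-- what changed: Replaces A's single-pass state machine (a 'current section' pointer mutated line by line) with a marker-driven scan: on each delimiter line B slices the segment up to the next delimiter and extends the chosen section, so no per-line current/None state is carried.
import Mathlib
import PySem

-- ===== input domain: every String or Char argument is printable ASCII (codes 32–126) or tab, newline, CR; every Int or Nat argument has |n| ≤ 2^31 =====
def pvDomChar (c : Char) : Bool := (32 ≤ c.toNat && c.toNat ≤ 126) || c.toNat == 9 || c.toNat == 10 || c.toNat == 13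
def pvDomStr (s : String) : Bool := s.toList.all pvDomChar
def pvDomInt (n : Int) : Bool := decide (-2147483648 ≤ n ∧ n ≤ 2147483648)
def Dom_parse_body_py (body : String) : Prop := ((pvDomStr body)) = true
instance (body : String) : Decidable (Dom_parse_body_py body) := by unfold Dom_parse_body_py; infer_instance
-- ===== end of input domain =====

-- B replaces A's current-pointer state machine with a two-level scan (on each marker,
-- slice forward to the next marker and extend the chosen section): alternative decomposition, same cost.


def descDelim : String := "<!-- DESCRIPTION -->"

def fixDelim : String := "<!-- FIX -->"

-- ===== PORT A =====
-- A's loop state: (description, fix, current, saw_marker); current = none | some true (description) | some false (fix)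
def stepA (st : List String × List String × Option Bool × Bool) (line : String) :
    List String × List String × Option Bool × Bool :=
  if line = descDelim then (st.1, st.2.1, some true, true)
  else if line = fixDelim then (st.1, st.2.1, some false, true)
  else
    match st.2.2.1 with
    | none => st
    | some true => (st.1 ++ [line], st.2.1, some true, st.2.2.2)
    | some false => (st.1, st.2.1 ++ [line], some false, st.2.2.2)

def parse_body_py (body : String) : Option String × Option String :=
  let stripped := PySem.Str.strip body
  if stripped = "" then (none, none)
  else
    let lines := PySem.Str.splitlines stripped
    let st := lines.foldl stepA ([], [], none, false)
    let description_text : Option String :=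
      let t := PySem.Str.strip (PySem.Str.join "\n" st.1)
      if t = "" then none else some t
    let fix_text : Option String :=
      let t := PySem.Str.strip (PySem.Str.join "\n" st.2.1)
      if t = "" then none else some t
    if description_text = none ∧ fix_text = none then
      if st.2.2.2 then (none, none)
      else ((if stripped = "" then none else some stripped), none)
    else (description_text, fix_text)

-- ===== PORT B =====
def isMarker (l : String) : Bool := l = descDelim || l = fixDelim

-- B's outer while loop: on a marker, scan forward to the next marker (takeWhile = the inner
-- while + slice), extend the chosen section with the segment, and jump past it (drop).
def walkB : List String → List String × List String × Bool
  | [] => ([], [], false)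
  | h :: t =>
    if h = descDelim then
      let seg := t.takeWhile (fun l => !isMarker l)
      let r := walkB (t.drop seg.length)
      (seg ++ r.1, r.2.1, true)
    else if h = fixDelim then
      let seg := t.takeWhile (fun l => !isMarker l)
      let r := walkB (t.drop seg.length)
      (r.1, seg ++ r.2.1, true)
    else walkB t
  termination_by l => l.length
  decreasing_by all_goals simp

def parse_body_py_alt (body : String) : Option String × Option String :=
  let stripped := PySem.Str.strip body
  if stripped = "" then (none, none)
  else
    let lines := PySem.Str.splitlines stripped
    let r := walkB lines
    let description_text : Option String :=
      let t := PySem.Str.strip (PySem.Str.join "\n" r.1)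
      if t = "" then none else some t
    let fix_text : Option String :=
      let t := PySem.Str.strip (PySem.Str.join "\n" r.2.1)
      if t = "" then none else some t
    if description_text = none ∧ fix_text = none then
      if r.2.2 then (none, none)
      else ((if stripped = "" then none else some stripped), none)
    else (description_text, fix_text)

-- ===== PRECONDITION & SPEC =====
def Spec_parse_body_py (body : String) (out : Option String × Option String) : Prop := out = parse_body_py_alt body
instance (body : String) (out : Option String × Option String) : Decidable (Spec_parse_body_py body out) := by unfold Spec_parse_body_py; infer_instance

-- ===== CLAIM (what is proved, stated in full; the proofs are below) =====
def Claim_equal_parse_body_py : Prop := ∀ (body : String), Dom_parse_body_py body → Spec_parse_body_py body (parse_body_py body)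

-- ===== LEMMAS AND PROOFS =====

-- what A's fold computes when started with current-pointer `cur`
def walkFrom (cur : Option Bool) (lines : List String) : List String × List String × Bool :=
  match cur with
  | none => walkB lines
  | some b =>
    let seg := lines.takeWhile (fun l => !isMarker l)
    let r := walkB (lines.drop seg.length)
    if b then (seg ++ r.1, r.2.1, r.2.2) else (r.1, seg ++ r.2.1, r.2.2)

lemma delim_ne : ¬ (fixDelim = descDelim) := by decide

lemma wfB_desc (t : List String) :
    (walkB (descDelim :: t)).1 = (walkFrom (some true) t).1 ∧
    (walkB (descDelim :: t)).2.1 = (walkFrom (some true) t).2.1 ∧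
    (walkB (descDelim :: t)).2.2 = true := by
  rw [walkB]; simp [walkFrom]

lemma wfB_fix (t : List String) :
    (walkB (fixDelim :: t)).1 = (walkFrom (some false) t).1 ∧
    (walkB (fixDelim :: t)).2.1 = (walkFrom (some false) t).2.1 ∧
    (walkB (fixDelim :: t)).2.2 = true := by
  rw [walkB]; simp [walkFrom, delim_ne]

lemma wf_marker (b : Bool) (h : String) (hm : isMarker h = true) (t : List String) :
    walkFrom (some b) (h :: t) =
      ((walkB (h :: t)).1, (walkB (h :: t)).2.1, (walkB (h :: t)).2.2) := by
  simp only [walkFrom, List.takeWhile_cons, hm]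
  cases b <;> simp

lemma wf_cons_true (h : String) (hm : isMarker h = false) (t : List String) :
    walkFrom (some true) (h :: t) =
      (h :: (walkFrom (some true) t).1, (walkFrom (some true) t).2.1, (walkFrom (some true) t).2.2) := by
  simp [walkFrom, hm]

lemma wf_cons_false (h : String) (hm : isMarker h = false) (t : List String) :
    walkFrom (some false) (h :: t) =
      ((walkFrom (some false) t).1, h :: (walkFrom (some false) t).2.1, (walkFrom (some false) t).2.2) := by
  simp [walkFrom, hm]

lemma walkB_skip (h : String) (hm : isMarker h = false) (t : List String) :
    walkB (h :: t) = walkB t := by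
  simp only [isMarker, Bool.or_eq_false_iff, decide_eq_false_iff_not] at hm
  rw [walkB]; simp [hm.1, hm.2]

lemma main_inv : ∀ (n : Nat) (lines : List String), lines.length = n →
    ∀ (d f : List String) (cur : Option Bool) (saw : Bool),
    (lines.foldl stepA (d, f, cur, saw)).1 = d ++ (walkFrom cur lines).1 ∧
    (lines.foldl stepA (d, f, cur, saw)).2.1 = f ++ (walkFrom cur lines).2.1 ∧
    (lines.foldl stepA (d, f, cur, saw)).2.2.2 = (saw || (walkFrom cur lines).2.2) := by
  intro n
  induction n using Nat.strong_induction_on with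
  | _ n IH =>
    intro lines hlen d f cur saw
    match lines with
    | [] =>
      cases cur with
      | none => simp [walkFrom, walkB]
      | some b => cases b <;> simp [walkFrom, walkB]
    | h :: t =>
      have hlt : t.length < n := by simp at hlen; omega
      by_cases hd : h = descDelim
      · subst hd
        have hstep : stepA (d, f, cur, saw) descDelim = (d, f, some true, true) := by
          simp [stepA]
        obtain ⟨i1, i2, i3⟩ := IH t.length hlt t rfl d f (some true) true
        obtain ⟨b1, b2, b3⟩ := wfB_desc t
        cases cur with
        | none =>
          simp only [List.foldl_cons, hstep, i1, i2, i3, walkFrom, b1, b2, b3]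
          simp
        | some b =>
          rw [wf_marker b descDelim (by simp [isMarker]) t]
          simp only [List.foldl_cons, hstep, i1, i2, i3, b1, b2, b3]
          simp
      · by_cases hf : h = fixDelim
        · subst hf
          have hstep : stepA (d, f, cur, saw) fixDelim = (d, f, some false, true) := by
            simp [stepA, delim_ne]
          obtain ⟨i1, i2, i3⟩ := IH t.length hlt t rfl d f (some false) true
          obtain ⟨b1, b2, b3⟩ := wfB_fix t
          cases cur with
          | none =>
            simp only [List.foldl_cons, hstep, i1, i2, i3, walkFrom, b1, b2, b3]
            simp
          | some b =>
            rw [wf_marker b fixDelim (by simp [isMarker]) t]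
            simp only [List.foldl_cons, hstep, i1, i2, i3, b1, b2, b3]
            simp
        · have hm : isMarker h = false := by simp [isMarker, hd, hf]
          cases cur with
          | none =>
            have hstep : stepA (d, f, none, saw) h = (d, f, none, saw) := by
              simp [stepA, hd, hf]
            obtain ⟨i1, i2, i3⟩ := IH t.length hlt t rfl d f none saw
            simp only [List.foldl_cons, hstep, i1, i2, i3, walkFrom, walkB_skip h hm t]
            simp
          | some b =>
            cases b with
            | true =>
              have hstep : stepA (d, f, some true, saw) h = (d ++ [h], f, some true, saw) := by
                simp [stepA, hd, hf]
              obtain ⟨i1, i2, i3⟩ := IH t.length hlt t rfl (d ++ [h]) f (some true) saw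
              rw [wf_cons_true h hm t]
              simp only [List.foldl_cons, hstep, i1, i2, i3]
              simp
            | false =>
              have hstep : stepA (d, f, some false, saw) h = (d, f ++ [h], some false, saw) := by
                simp [stepA, hd, hf]
              obtain ⟨i1, i2, i3⟩ := IH t.length hlt t rfl d (f ++ [h]) (some false) saw
              rw [wf_cons_false h hm t]
              simp only [List.foldl_cons, hstep, i1, i2, i3]
              simp

-- ===== VERDICT (by name: the statement is the Claim_ definition above) =====
theorem parse_body_py_spec : Claim_equal_parse_body_py := by
  intro body _
  obtain ⟨e1, e2, e3⟩ :=
    main_inv (PySem.Str.splitlines (PySem.Str.strip body)).length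
      (PySem.Str.splitlines (PySem.Str.strip body)) rfl [] [] none false
  simp only [walkFrom, List.nil_append, Bool.false_or] at e1 e2 e3
  simp only [Spec_parse_body_py, parse_body_py, parse_body_py_alt, e1, e2, e3]
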